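-- pv_equiv track=rewrite | github.com/jmoh3/TransitionTreesComplexity | reconstruct_permutation.py | reconstruct_permutation_complete
-- ===== SOURCE A (Python) =====
-- import bisect
--
-- def reconstruct_permutation_complete(l):
--     w = [l[0]+1]
--     sorted_w = [l[0]+1]
--
--     for boxes in l[1:]:
--         counter = boxes + 1
--         idx = 0
--         while idx < len(sorted_w) and sorted_w[idx] <= counter:
--             counter += 1
--             idx += 1
--         to_add = counter
--         w.append(to_add)
--         bisect.insort(sorted_w, to_add)
--
--     last = 1
--
--     for idx in range(0, len(sorted_w)):
--         if last < sorted_w[idx]: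
--             while last < sorted_w[idx]:
--                 w.append(last)
--                 last += 1
--         if sorted_w[idx] == last:
--             last += 1
--
--     return w
-- ===== SOURCE B (Python) =====
-- import bisect
--
-- def reconstruct_permutation_complete(l):
--     first = l[0] + 1
--     w = [first]
--     sorted_w = [first]
--     for boxes in l[1:]:
--         c0 = boxes + 1
--         # sorted_w is strictly increasing, so j -> sorted_w[j] - j is non-decreasing:
--         # binary search for the first j with sorted_w[j] - j > c0
--         lo, hi = 0, len(sorted_w)
--         while lo < hi:
--             mid = (lo + hi) // 2
--             if sorted_w[mid] - mid > c0:
--                 hi = mid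
--             else:
--                 lo = mid + 1
--         to_add = c0 + lo
--         w.append(to_add)
--         bisect.insort(sorted_w, to_add)
--     # append every integer in [1, max(sorted_w)) missing from sorted_w, in one
--     # range-extend per gap
--     last = 1
--     for s in sorted_w:
--         if s >= last:
--             w.extend(range(last, s))
--             last = s + 1
--     return w
-- ===== Notes on version B (the rewrite author's own statement) =====
-- stated objective: faster
-- what changed: Per step, replaces A's linear idx/counter scan over the sorted list by a binary search for the first j with sorted_w[j]-j > boxes+1 (valid since sorted_w is strictly increasing), and replaces the per-integer gap-filling while loop by one range-extend per gap.
import Mathlib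
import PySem

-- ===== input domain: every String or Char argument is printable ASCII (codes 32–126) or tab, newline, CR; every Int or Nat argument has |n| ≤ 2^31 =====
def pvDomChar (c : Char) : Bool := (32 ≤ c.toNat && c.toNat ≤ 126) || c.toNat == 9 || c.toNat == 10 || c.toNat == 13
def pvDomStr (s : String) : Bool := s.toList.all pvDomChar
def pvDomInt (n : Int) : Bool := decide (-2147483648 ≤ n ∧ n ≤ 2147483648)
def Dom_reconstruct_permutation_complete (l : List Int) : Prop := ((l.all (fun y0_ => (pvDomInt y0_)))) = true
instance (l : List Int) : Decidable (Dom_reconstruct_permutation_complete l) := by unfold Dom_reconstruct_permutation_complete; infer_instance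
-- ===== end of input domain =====

-- B replaces A's per-step linear scan over the sorted list by a binary search on
-- j ↦ sorted_w[j] - j (non-decreasing since sorted_w is strictly increasing), and the
-- per-integer gap-filling while loop by one range per gap; measurably faster. A mutates
-- nothing observable; equivalence is about the return value.


-- ===== PORT A =====
-- bisect.insort (both Pythons call it): insert x after the elements ≤ x
def pvInsort (s : List Int) (x : Int) : List Int :=
  match s with
  | [] => [x]
  | h :: t => if h ≤ x then h :: pvInsort t x else x :: h :: t

-- A's while loop: idx/counter walk over sorted_w
def pvScanA (s : List Int) (counter : Int) : Int :=
  match s with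
  | [] => counter
  | h :: t => if h ≤ counter then pvScanA t (counter + 1) else counter

-- A's inner while in the second loop: append last, last+1, … while last < s
def pvFillRunA (last s : Int) : List Int :=
  if last < s then last :: pvFillRunA (last + 1) s else []
termination_by (s - last).toNat
decreasing_by omega

-- A's second for loop
def pvFillA (sw : List Int) (last : Int) (w : List Int) : List Int :=
  match sw with
  | [] => w
  | s :: rest =>
    let w2 := if last < s then w ++ pvFillRunA last s else w
    let last1 := if last < s then s else last
    let last2 := if s = last1 then last1 + 1 else last1
    pvFillA rest last2 w2

def reconstruct_permutation_complete (l : List Int) : List Int :=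
  match l with
  | [] => []  -- A raises IndexError here (indexing the first element); excluded by Pre_
  | x :: rest =>
    let st := rest.foldl (fun (st : List Int × List Int) boxes =>
      let to_add := pvScanA st.2 (boxes + 1)
      (st.1 ++ [to_add], pvInsort st.2 to_add)) ([x + 1], [x + 1])
    pvFillA st.2 1 st.1

-- ===== PORT B =====
-- B's binary-search while loop: first j in [lo,hi) with arr[j] - j > c0, else hi
def pvBSearch (arr : List Int) (c0 : Int) (lo hi : Nat) : Nat :=
  if lo < hi then
    let mid := (lo + hi) / 2
    if arr.getD mid 0 - (mid : Int) > c0 then pvBSearch arr c0 lo mid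
    else pvBSearch arr c0 (mid + 1) hi
  else lo
termination_by hi - lo
decreasing_by all_goals omega

-- B's second for loop: one range per gap
def pvFillB (sw : List Int) (last : Int) (w : List Int) : List Int :=
  match sw with
  | [] => w
  | s :: rest =>
    if last ≤ s then pvFillB rest (s + 1) (w ++ PySem.List.pyRange last s 1)
    else pvFillB rest last w

def reconstruct_permutation_complete_alt (l : List Int) : List Int :=
  match l with
  | [] => []  -- B raises here too; excluded by Pre_
  | x :: rest =>
    let st := rest.foldl (fun (st : List Int × List Int) boxes =>
      let c0 := boxes + 1
      let to_add := c0 + (pvBSearch st.2 c0 0 st.2.length : Int)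
      (st.1 ++ [to_add], pvInsort st.2 to_add)) ([x + 1], [x + 1])
    pvFillB st.2 1 st.1

-- ===== PRECONDITION & SPEC =====
-- A indexes the first element, so it raises IndexError exactly on the empty list.
def Pre_reconstruct_permutation_complete (l : List Int) : Prop := l ≠ []
instance (l : List Int) : Decidable (Pre_reconstruct_permutation_complete l) := by unfold Pre_reconstruct_permutation_complete; infer_instance
def pvWitness_reconstruct_permutation_complete : List Int := [0, 1, 0]

def Spec_reconstruct_permutation_complete (l : List Int) (out : List Int) : Prop := out = reconstruct_permutation_complete_alt l
instance (l : List Int) (out : List Int) : Decidable (Spec_reconstruct_permutation_complete l out) := by unfold Spec_reconstruct_permutation_complete; infer_instance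

-- ===== CLAIM (what is proved, stated in full; the proofs are below) =====
def Claim_equal_reconstruct_permutation_complete : Prop := ∀ (l : List Int), Dom_reconstruct_permutation_complete l → Pre_reconstruct_permutation_complete l → Spec_reconstruct_permutation_complete l (reconstruct_permutation_complete l)

-- ===== LEMMAS AND PROOFS =====

-- proof-side counter: how many steps A's scan takes
def pvCnt (s : List Int) (c : Int) : Nat :=
  match s with
  | [] => 0
  | h :: t => if h ≤ c then pvCnt t (c + 1) + 1 else 0

theorem pvScanA_eq_cnt (s : List Int) (c : Int) : pvScanA s c = c + (pvCnt s c : Int) := by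
  induction s generalizing c with
  | nil => simp [pvScanA, pvCnt]
  | cons h t ih =>
    simp only [pvScanA, pvCnt]
    split
    · rw [ih]; push_cast; ring
    · simp

theorem pvCnt_le_length (s : List Int) (c : Int) : pvCnt s c ≤ s.length := by
  induction s generalizing c with
  | nil => simp [pvCnt]
  | cons h t ih =>
    simp only [pvCnt, List.length_cons]
    split
    · exact Nat.succ_le_succ (ih _)
    · omega

theorem pvCnt_lt (s : List Int) (c : Int) (j : Nat) (hj : j < pvCnt s c) :
    s.getD j 0 ≤ c + j := by
  induction s generalizing c j with
  | nil => simp [pvCnt] at hj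
  | cons h t ih =>
    by_cases hc : h ≤ c
    · simp only [pvCnt, if_pos hc] at hj
      cases j with
      | zero => simpa using hc
      | succ j =>
        have := ih (c + 1) j (by omega)
        simp only [List.getD_cons_succ]
        push_cast at this ⊢
        omega
    · simp only [pvCnt, if_neg hc] at hj
      omega

theorem pvCnt_get (s : List Int) (c : Int) (h : pvCnt s c < s.length) :
    c + pvCnt s c < s.getD (pvCnt s c) 0 := by
  induction s generalizing c with
  | nil => simp at h
  | cons hd t ih =>
    by_cases hc : hd ≤ c
    · simp only [pvCnt, if_pos hc] at h ⊢
      simp only [List.length_cons] at h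
      have := ih (c + 1) (by omega)
      simp only [List.getD_cons_succ]
      push_cast at this ⊢
      omega
    · simp only [pvCnt, if_neg hc] at h ⊢
      simp only [List.getD_cons_zero]
      omega

-- strict sortedness makes j ↦ s[j] - j non-decreasing
theorem pv_sorted_shift (s : List Int) (hs : s.Pairwise (· < ·)) (j k : Nat)
    (hjk : j ≤ k) (hk : k < s.length) :
    s.getD j 0 - (j : Int) ≤ s.getD k 0 - (k : Int) := by
  rcases Nat.lt_or_ge j k with hlt | hge
  · have hj : j < s.length := lt_trans hlt hk
    have h1 : s[j] < s[k] := (List.pairwise_iff_getElem.mp hs) j k hj hk hlt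
    -- stronger: s[k] - s[j] ≥ k - j, by induction on k
    have key : ∀ (k : Nat) (hk : k < s.length) (hjk : j < k), s[j] + ((k : Int) - j) ≤ s[k] := by
      intro k
      induction k with
      | zero => omega
      | succ k ihk =>
        intro hk1 hjk1
        rcases Nat.lt_or_ge j k with h2 | h2
        · have hkl : k < s.length := by omega
          have := ihk hkl h2
          have hadj : s[k] < s[k + 1] := (List.pairwise_iff_getElem.mp hs) k (k+1) hkl hk1 (by omega)
          push_cast
          push_cast at this
          omega
        · have hjk2 : j = k := by omega
          subst hjk2
          have hadj : s[j] < s[j + 1] := (List.pairwise_iff_getElem.mp hs) j (j+1) (by omega) hk1 (by omega)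
          push_cast
          omega
    have := key k hk hlt
    rw [List.getD_eq_getElem s 0 hj, List.getD_eq_getElem s 0 hk]
    omega
  · have : j = k := by omega
    subst this
    omega

theorem pvBSearch_eq_cnt (arr : List Int) (c : Int) (hs : arr.Pairwise (· < ·)) :
    ∀ (lo hi : Nat), lo ≤ pvCnt arr c → pvCnt arr c ≤ hi → hi ≤ arr.length →
    pvBSearch arr c lo hi = pvCnt arr c := by
  intro lo hi
  induction hlh : hi - lo using Nat.strong_induction_on generalizing lo hi with
  | _ n ih =>
  intro h1 h2 h3
  rw [pvBSearch]
  by_cases hlt : lo < hi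
  · simp only [hlt, if_true]
    set mid := (lo + hi) / 2 with hmid
    have hmlo : lo ≤ mid := by omega
    have hmhi : mid < hi := by omega
    have hmlen : mid < arr.length := by omega
    by_cases hcond : arr.getD mid 0 - (mid : Int) > c
    · simp only [hcond, if_true]
      have hN : pvCnt arr c ≤ mid := by
        by_contra hcon
        have := pvCnt_lt arr c mid (by omega)
        omega
      exact ih (mid - lo) (by omega) lo mid rfl h1 hN (by omega)
    · simp only [hcond, if_false]
      have hN : mid < pvCnt arr c := by
        by_contra hcon
        rw [Nat.not_lt] at hcon
        have hNlen : pvCnt arr c < arr.length := by omega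
        have hg := pvCnt_get arr c hNlen
        have := pv_sorted_shift arr hs (pvCnt arr c) mid hcon hmlen
        omega
      exact ih (hi - (mid + 1)) (by omega) (mid + 1) hi rfl (by omega) h2 h3
  · simp only [hlt, if_false]
    omega

@[simp] theorem pv_mem_insort (s : List Int) (x y : Int) :
    y ∈ pvInsort s x ↔ y = x ∨ y ∈ s := by
  induction s with
  | nil => simp [pvInsort]
  | cons h t ih =>
    simp only [pvInsort]
    split
    · simp only [List.mem_cons, ih]; tauto
    · simp only [List.mem_cons]

theorem pv_insort_pairwise (s : List Int) (x : Int) (hs : s.Pairwise (· < ·))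
    (hx : x ∉ s) : (pvInsort s x).Pairwise (· < ·) := by
  induction s with
  | nil => simp [pvInsort]
  | cons h t ih =>
    simp only [pvInsort]
    rcases List.pairwise_cons.mp hs with ⟨hall, ht⟩
    split
    · refine List.pairwise_cons.mpr ⟨?_, ih ht (by simp at hx; tauto)⟩
      intro y hy
      rcases (pv_mem_insort t x y).mp hy with rfl | hyt
      · have : h ≠ y := by simp at hx; tauto
        omega
      · exact hall y hyt
    · refine List.pairwise_cons.mpr ⟨?_, hs⟩
      intro y hy
      simp at hy
      rcases hy with rfl | hyt
      · omega
      · have := hall y hyt; omega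

theorem pv_toadd_not_mem (s : List Int) (c : Int) (hs : s.Pairwise (· < ·)) :
    c + (pvCnt s c : Int) ∉ s := by
  intro hmem
  rcases List.mem_iff_getElem.mp hmem with ⟨j, hj, hval⟩
  rcases Nat.lt_or_ge j (pvCnt s c) with hlt | hge
  · have := pvCnt_lt s c j hlt
    rw [List.getD_eq_getElem s 0 hj] at this
    omega
  · have hNlen : pvCnt s c < s.length := by omega
    have hg := pvCnt_get s c hNlen
    have := pv_sorted_shift s hs (pvCnt s c) j hge hj
    rw [List.getD_eq_getElem s 0 hj] at this
    omega

-- the two folds produce the same state, and its sorted component stays strictly sorted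
theorem pv_fold_eq (rest : List Int) :
    ∀ (w sw : List Int), sw.Pairwise (· < ·) →
    (rest.foldl (fun (st : List Int × List Int) boxes =>
        let to_add := pvScanA st.2 (boxes + 1)
        (st.1 ++ [to_add], pvInsort st.2 to_add)) (w, sw)) =
    (rest.foldl (fun (st : List Int × List Int) boxes =>
        let c0 := boxes + 1
        let to_add := c0 + (pvBSearch st.2 c0 0 st.2.length : Int)
        (st.1 ++ [to_add], pvInsort st.2 to_add)) (w, sw)) ∧
    ((rest.foldl (fun (st : List Int × List Int) boxes =>
        let to_add := pvScanA st.2 (boxes + 1)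
        (st.1 ++ [to_add], pvInsort st.2 to_add)) (w, sw)).2).Pairwise (· < ·) := by
  induction rest with
  | nil => intro w sw hs; exact ⟨rfl, hs⟩
  | cons b rest ih =>
    intro w sw hs
    have hb : pvBSearch sw (b + 1) 0 sw.length = pvCnt sw (b + 1) :=
      pvBSearch_eq_cnt sw (b + 1) hs 0 sw.length (Nat.zero_le _) (pvCnt_le_length _ _) le_rfl
    have hscan : pvScanA sw (b + 1) = (b + 1) + (pvCnt sw (b + 1) : Int) := pvScanA_eq_cnt _ _
    have hnm : (b + 1) + (pvCnt sw (b + 1) : Int) ∉ sw := pv_toadd_not_mem sw (b + 1) hs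
    have hsort : (pvInsort sw (pvScanA sw (b + 1))).Pairwise (· < ·) := by
      rw [hscan]; exact pv_insort_pairwise _ _ hs hnm
    have e : (b + 1) + (pvBSearch sw (b + 1) 0 sw.length : Int) = pvScanA sw (b + 1) := by
      rw [hb, hscan]
    rw [List.foldl_cons, List.foldl_cons]
    change (List.foldl _ (w ++ [pvScanA sw (b + 1)], pvInsort sw (pvScanA sw (b + 1))) rest =
        List.foldl _ (w ++ [(b + 1) + (pvBSearch sw (b + 1) 0 sw.length : Int)],
          pvInsort sw ((b + 1) + (pvBSearch sw (b + 1) 0 sw.length : Int))) rest) ∧ _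
    rw [e]
    exact ih _ _ hsort

theorem pvFillRunA_eq_pyRange (a b : Int) : pvFillRunA a b = PySem.List.pyRange a b 1 := by
  by_cases h : a < b
  · rw [pvFillRunA, if_pos h, PySem.List.pyRange_one_cons h, pvFillRunA_eq_pyRange (a + 1) b]
  · rw [pvFillRunA, if_neg h, PySem.List.pyRange_one_eq_nil (by omega)]
termination_by (b - a).toNat
decreasing_by omega

theorem pvFill_eq (sw : List Int) : ∀ (last : Int) (w : List Int),
    pvFillA sw last w = pvFillB sw last w := by
  induction sw with
  | nil => intro last w; rfl
  | cons s rest ih =>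
    intro last w
    rcases lt_trichotomy last s with h | h | h
    · have h2 : last ≤ s := le_of_lt h
      simp only [pvFillA, pvFillB, if_pos h, if_pos h2, ite_true]
      rw [pvFillRunA_eq_pyRange, ih]
    · subst h
      simp only [pvFillA, pvFillB, if_neg (lt_irrefl last), if_pos (le_refl last), ite_true]
      rw [PySem.List.pyRange_one_eq_nil le_rfl, List.append_nil, ih]
    · have h1 : ¬ last < s := by omega
      have h2 : ¬ last ≤ s := by omega
      have h3 : ¬ s = last := by omega
      simp only [pvFillA, pvFillB, if_neg h1, if_neg h2, if_neg h3]
      exact ih _ _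

-- ===== VERDICT (by name: the statement is the Claim_ definition above) =====
theorem reconstruct_permutation_complete_spec : Claim_equal_reconstruct_permutation_complete := by
  intro l _ hpre
  unfold Spec_reconstruct_permutation_complete
  match l with
  | [] => exact absurd rfl hpre
  | x :: rest =>
    simp only [reconstruct_permutation_complete, reconstruct_permutation_complete_alt]
    have h := pv_fold_eq rest [x + 1] [x + 1] (by simp)
    rw [← h.1, pvFill_eq]
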